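-- pv_equiv track=rewrite | github.com/nabilasharif22/neuroscan | visualization.py | make_node_hover_text
-- ===== SOURCE A (Python) =====
-- def make_node_hover_text(pos, inputs, outputs, model_nodes):
--     hover_text = []
--     for node in pos:
--         if node in inputs:
--             role = "Manipulated variable"
--         elif node in outputs:
--             role = "Measured variable"
--         elif node in model_nodes:
--             role = "Model component"
--         else:
--             role = "Derived node"
--         hover_text.append(f"<b>{node}</b><br>{role}")
--     return hover_text
-- ===== SOURCE B (Python) =====
-- def make_node_hover_text(pos, inputs, outputs, model_nodes):
--     # Staged overwrite: start all-Derived, then repaint per role in reverse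
--     # priority order (overwrite gives inputs final say), then format.
--     roles = ["Derived node"] * len(pos)
--     for members, role in ((model_nodes, "Model component"),
--                           (outputs, "Measured variable"),
--                           (inputs, "Manipulated variable")):
--         s = set(members)
--         roles = [role if node in s else r for node, r in zip(pos, roles)]
--     return [f"<b>{node}</b><br>{r}" for node, r in zip(pos, roles)]
-- ===== Notes on version B (the rewrite author's own statement) =====
-- stated objective: alternative
-- what changed: B replaces A's single pass with a per-node if/elif membership chain by staged repainting: it starts with an all-'Derived node' roles list parallel to pos and makes one overwrite pass per category (model_nodes, outputs, inputs, so overwrite order gives inputs priority) using a set for membership, then formats pos zipped with roles.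
import Mathlib
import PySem

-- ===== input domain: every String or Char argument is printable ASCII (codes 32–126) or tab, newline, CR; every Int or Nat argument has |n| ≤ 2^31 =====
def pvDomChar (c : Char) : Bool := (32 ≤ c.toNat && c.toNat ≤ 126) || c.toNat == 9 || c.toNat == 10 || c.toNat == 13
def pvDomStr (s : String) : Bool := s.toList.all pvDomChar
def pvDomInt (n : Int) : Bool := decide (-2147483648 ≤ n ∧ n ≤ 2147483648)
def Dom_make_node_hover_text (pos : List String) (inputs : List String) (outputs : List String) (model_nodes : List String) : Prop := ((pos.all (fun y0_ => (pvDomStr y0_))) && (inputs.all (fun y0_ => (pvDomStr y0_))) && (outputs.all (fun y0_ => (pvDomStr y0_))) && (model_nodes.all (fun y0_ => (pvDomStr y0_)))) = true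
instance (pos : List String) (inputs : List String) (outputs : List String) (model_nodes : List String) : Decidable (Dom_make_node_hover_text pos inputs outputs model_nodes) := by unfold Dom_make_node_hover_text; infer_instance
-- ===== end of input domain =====

-- B repaints an all-default roles list in one overwrite pass per category (reverse priority order,
-- set membership) and formats pos zipped with roles, instead of A's per-node if/elif chain (alternative).

-- ===== PORT A =====
def make_node_hover_text (pos : List String) (inputs : List String) (outputs : List String) (model_nodes : List String) : List String :=
  pos.foldl (fun hover_text node =>
    let role :=
      if inputs.contains node then "Manipulated variable"
      else if outputs.contains node then "Measured variable"
      else if model_nodes.contains node then "Model component"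
      else "Derived node"
    hover_text ++ ["<b>" ++ node ++ "</b><br>" ++ role]) []

-- ===== PORT B =====
def make_node_hover_text_alt (pos : List String) (inputs : List String) (outputs : List String) (model_nodes : List String) : List String :=
  let roles0 := List.replicate pos.length "Derived node"
  let roles := [(model_nodes, "Model component"), (outputs, "Measured variable"), (inputs, "Manipulated variable")].foldl
    (fun r (pr : List String × String) =>
      let s := PySem.Set.ofList pr.1
      (pos.zip r).map (fun p => if s.contains p.1 then pr.2 else p.2)) roles0
  (pos.zip roles).map (fun p => "<b>" ++ p.1 ++ "</b><br>" ++ p.2)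

-- ===== PRECONDITION & SPEC =====
def Spec_make_node_hover_text (pos : List String) (inputs : List String) (outputs : List String) (model_nodes : List String) (out : List String) : Prop := out = make_node_hover_text_alt pos inputs outputs model_nodes
instance (pos : List String) (inputs : List String) (outputs : List String) (model_nodes : List String) (out : List String) : Decidable (Spec_make_node_hover_text pos inputs outputs model_nodes out) := by unfold Spec_make_node_hover_text; infer_instance

-- ===== CLAIM (what is proved, stated in full; the proofs are below) =====
def Claim_equal_make_node_hover_text : Prop := ∀ (pos : List String) (inputs : List String) (outputs : List String) (model_nodes : List String), Dom_make_node_hover_text pos inputs outputs model_nodes → Spec_make_node_hover_text pos inputs outputs model_nodes (make_node_hover_text pos inputs outputs model_nodes)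

-- ===== LEMMAS AND PROOFS =====

-- One repaint pass over pos zipped with a roles list that is pointwise g of pos is again pointwise.
theorem repaint_map (pos : List String) (g : String → String) (s : PySem.Set String) (role : String) :
    (pos.zip (pos.map g)).map (fun p => if s.contains p.1 then role else p.2)
      = pos.map (fun n => if s.contains n then role else g n) := by
  induction pos with
  | nil => rfl
  | cons x xs ih => simpa using ih

-- The final formatting pass over pos zipped with a pointwise roles list is a single map over pos.
theorem format_map (pos : List String) (g : String → String) :
    (pos.zip (pos.map g)).map (fun p => "<b>" ++ p.1 ++ "</b><br>" ++ p.2)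
      = pos.map (fun n => "<b>" ++ n ++ "</b><br>" ++ g n) := by
  induction pos with
  | nil => rfl
  | cons x xs ih => simpa using ih

-- ===== VERDICT (by name: the statement is the Claim_ definition above) =====
theorem make_node_hover_text_spec : Claim_equal_make_node_hover_text := by
  intro pos inputs outputs model_nodes _
  unfold Spec_make_node_hover_text make_node_hover_text make_node_hover_text_alt
  rw [PySem.List.foldl_append_singleton_eq_map]
  simp only [List.foldl_cons, List.foldl_nil]
  rw [show List.replicate pos.length "Derived node" = pos.map (fun _ => "Derived node") by
        simp [List.map_const']]
  rw [repaint_map pos (fun _ => "Derived node") (PySem.Set.ofList model_nodes) "Model component",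
      repaint_map pos _ (PySem.Set.ofList outputs) "Measured variable",
      repaint_map pos _ (PySem.Set.ofList inputs) "Manipulated variable",
      format_map pos]
  refine List.map_congr_left (fun node _ => ?_)
  by_cases hi : node ∈ inputs <;> by_cases ho : node ∈ outputs <;>
    by_cases hm : node ∈ model_nodes <;>
    simp [hi, ho, hm, PySem.Set.mem_ofList]
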